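-- pv_equiv track=rewrite | github.com/rizqikapratamaa/Tucil1_13522126 | src/tesv2.py | generate_all_paths
-- ===== SOURCE A (Python) =====
-- def generate_all_paths(matrix, buffer_size, start=(0,0), is_horizontal=True):
--     i, j = start
--     if buffer_size == 1:
--         if is_horizontal:
--             return [[(i, new_j)] for new_j in range(len(matrix[0])) if new_j != j]
--         else:
--             return [[(new_i, j)] for new_i in range(len(matrix)) if new_i != i]
--     else:
--         paths = []
--         if is_horizontal:
--             for new_j in range(len(matrix[0])):
--                 if new_j != j:
--                     smaller_paths = generate_all_paths(matrix, buffer_size - 1, start=(i, new_j), is_horizontal=False)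
--                     for path in smaller_paths:
--                         paths.append([(i, new_j)] + path)
--         else:
--             for new_i in range(len(matrix)):
--                 if new_i != i:
--                     smaller_paths = generate_all_paths(matrix, buffer_size - 1, start=(new_i, j), is_horizontal=True)
--                     for path in smaller_paths:
--                         paths.append([(new_i, j)] + path)
--         return paths
-- ===== SOURCE B (Python) =====
-- def generate_all_paths(matrix, buffer_size, start=(0, 0), is_horizontal=True):
--     rows = len(matrix)
--     cols = len(matrix[0]) if matrix else 0
--     i0, j0 = start
--     frontier = [(i0, j0, [])]
--     horizontal = is_horizontal
--     for _ in range(buffer_size):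
--         if not frontier:
--             break
--         new_frontier = []
--         for i, j, path in frontier:
--             if horizontal:
--                 for nj in range(cols):
--                     if nj != j:
--                         new_frontier.append((i, nj, path + [(i, nj)]))
--             else:
--                 for ni in range(rows):
--                     if ni != i:
--                         new_frontier.append((ni, j, path + [(ni, j)]))
--         frontier = new_frontier
--         horizontal = not horizontal
--     return [path for _, _, path in frontier]
-- ===== Notes on version B (the rewrite author's own statement) =====
-- stated objective: alternative
-- what changed: Replaces A's recursion on buffer_size with an iterative breadth-first frontier expansion: one loop over levels maintaining a list of (i, j, path) states and a toggling orientation flag, building paths front-to-back instead of by prepending in the recursion unwind.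
-- outside the precondition, e.g. on generate_all_paths([], 0, (0, 0), False): A returns [], B returns [[]]
import Mathlib
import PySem

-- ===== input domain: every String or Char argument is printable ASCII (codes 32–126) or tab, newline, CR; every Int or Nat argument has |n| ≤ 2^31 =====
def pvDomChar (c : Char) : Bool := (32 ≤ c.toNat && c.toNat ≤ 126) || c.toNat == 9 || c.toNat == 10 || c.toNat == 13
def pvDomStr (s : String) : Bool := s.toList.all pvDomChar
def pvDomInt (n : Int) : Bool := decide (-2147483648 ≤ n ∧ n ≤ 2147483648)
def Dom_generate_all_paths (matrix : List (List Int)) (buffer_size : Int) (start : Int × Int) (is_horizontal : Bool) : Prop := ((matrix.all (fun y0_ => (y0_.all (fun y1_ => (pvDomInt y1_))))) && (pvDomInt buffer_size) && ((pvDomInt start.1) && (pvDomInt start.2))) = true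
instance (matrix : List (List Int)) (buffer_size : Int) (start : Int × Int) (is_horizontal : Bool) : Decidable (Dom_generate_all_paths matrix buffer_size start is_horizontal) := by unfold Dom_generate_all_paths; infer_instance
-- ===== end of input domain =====

-- ===== PORT A =====
-- B replaces A's recursion on buffer_size with an iterative frontier (BFS-by-level) loop; same output, similar cost ("alternative").

-- A recurses on buffer_size; ported with buffer_size.toNat as the structural measure
-- (buffer_size >= 1 inside Pre_; Python's recursion does not terminate for buffer_size <= 0).
def genA (matrix : List (List Int)) : Nat → Int → Int → Bool → List (List (Int × Int))
  | 0, _, _, _ => []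
  | 1, i, j, h =>
      if h then
        ((PySem.List.pyRange 0 ((matrix.headD []).length : Int) 1).filter (fun nj => nj ≠ j)).map
          (fun nj => [(i, nj)])
      else
        ((PySem.List.pyRange 0 (matrix.length : Int) 1).filter (fun ni => ni ≠ i)).map
          (fun ni => [(ni, j)])
  | n + 2, i, j, h =>
      if h then
        (PySem.List.pyRange 0 ((matrix.headD []).length : Int) 1).foldl (fun paths nj =>
          if nj ≠ j then
            paths ++ (genA matrix (n + 1) i nj false).map (fun p => (i, nj) :: p)
          else paths) []
      else
        (PySem.List.pyRange 0 (matrix.length : Int) 1).foldl (fun paths ni =>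
          if ni ≠ i then
            paths ++ (genA matrix (n + 1) ni j true).map (fun p => (ni, j) :: p)
          else paths) []

def generate_all_paths (matrix : List (List Int)) (buffer_size : Int) (start : Int × Int) (is_horizontal : Bool) : List (List (Int × Int)) :=
  genA matrix buffer_size.toNat start.1 start.2 is_horizontal

-- ===== PORT B =====
-- one level of B's frontier expansion (the body of B's outer loop)
def stepB (matrix : List (List Int)) (horiz : Bool) (F : List (Int × Int × List (Int × Int))) : List (Int × Int × List (Int × Int)) :=
  F.foldl (fun acc e =>
    if horiz then
      (PySem.List.pyRange 0 ((matrix.headD []).length : Int) 1).foldl (fun a nj =>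
        if nj ≠ e.2.1 then a ++ [(e.1, nj, e.2.2 ++ [(e.1, nj)])] else a) acc
    else
      (PySem.List.pyRange 0 (matrix.length : Int) 1).foldl (fun a ni =>
        if ni ≠ e.1 then a ++ [(ni, e.2.1, e.2.2 ++ [(ni, e.2.1)])] else a) acc) []

def generate_all_paths_alt (matrix : List (List Int)) (buffer_size : Int) (start : Int × Int) (is_horizontal : Bool) : List (List (Int × Int)) :=
  ((PySem.List.pyRange 0 buffer_size 1).foldl
      (fun st _ => if st.1.isEmpty then st else (stepB matrix st.2 st.1, !st.2))
      ([(start.1, start.2, ([] : List (Int × Int)))], is_horizontal)).1.map (fun e => e.2.2)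

-- ===== PRECONDITION & SPEC =====
-- Pre_ excludes buffer_size <= 0, where A either recurses forever (RecursionError) or — only when every move
-- from the start is blocked, e.g. an empty matrix moving vertically — accidentally returns [] from a dead loop;
-- and it excludes matrix = [] with is_horizontal = true, where A raises IndexError on matrix[0].
def Pre_generate_all_paths (matrix : List (List Int)) (buffer_size : Int) (start : Int × Int) (is_horizontal : Bool) : Prop :=
  1 ≤ buffer_size ∧ (is_horizontal = true → matrix ≠ [])
instance (matrix : List (List Int)) (buffer_size : Int) (start : Int × Int) (is_horizontal : Bool) : Decidable (Pre_generate_all_paths matrix buffer_size start is_horizontal) := by unfold Pre_generate_all_paths; infer_instance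

def pvWitness_generate_all_paths : List (List Int) × Int × (Int × Int) × Bool := ([[1, 2], [3, 4]], 2, (0, 0), true)

def Spec_generate_all_paths (matrix : List (List Int)) (buffer_size : Int) (start : Int × Int) (is_horizontal : Bool) (out : List (List (Int × Int))) : Prop := out = generate_all_paths_alt matrix buffer_size start is_horizontal
instance (matrix : List (List Int)) (buffer_size : Int) (start : Int × Int) (is_horizontal : Bool) (out : List (List (Int × Int))) : Decidable (Spec_generate_all_paths matrix buffer_size start is_horizontal out) := by unfold Spec_generate_all_paths; infer_instance

-- ===== CLAIM (what is proved, stated in full; the proofs are below) =====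
def Claim_equal_generate_all_paths : Prop := ∀ (matrix : List (List Int)) (buffer_size : Int) (start : Int × Int) (is_horizontal : Bool), Dom_generate_all_paths matrix buffer_size start is_horizontal → Pre_generate_all_paths matrix buffer_size start is_horizontal → Spec_generate_all_paths matrix buffer_size start is_horizontal (generate_all_paths matrix buffer_size start is_horizontal)

-- ===== LEMMAS AND PROOFS =====

-- B's level loop with the orientation flag made explicit
def iterB (matrix : List (List Int)) : Nat → Bool → List (Int × Int × List (Int × Int)) → List (Int × Int × List (Int × Int))
  | 0, _, F => F
  | n + 1, h, F => iterB matrix n (!h) (stepB matrix h F)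

-- the children produced by one frontier entry at one level
def childB (matrix : List (List Int)) (horiz : Bool) (e : Int × Int × List (Int × Int)) : List (Int × Int × List (Int × Int)) :=
  if horiz then
    ((PySem.List.pyRange 0 ((matrix.headD []).length : Int) 1).filter (fun nj => nj ≠ e.2.1)).map
      (fun nj => (e.1, nj, e.2.2 ++ [(e.1, nj)]))
  else
    ((PySem.List.pyRange 0 (matrix.length : Int) 1).filter (fun ni => ni ≠ e.1)).map
      (fun ni => (ni, e.2.1, e.2.2 ++ [(ni, e.2.1)]))

theorem foldl_ignore_eq_iterate {σ α : Type} (f : σ → σ) (l : List α) (s : σ) :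
    l.foldl (fun s _ => f s) s = f^[l.length] s := by
  induction l generalizing s with
  | nil => rfl
  | cons a l ih => simp [List.foldl_cons, ih, Function.iterate_succ_apply]

theorem foldl_append_if_list {α β : Type} (l : List α) (p : α → Prop) [DecidablePred p] (g : α → List β) (acc : List β) :
    l.foldl (fun a x => if p x then a ++ g x else a) acc
      = acc ++ (l.filter (fun x => decide (p x))).flatMap g := by
  induction l generalizing acc with
  | nil => simp
  | cons x l ih =>
      by_cases hx : p x <;> simp [List.foldl_cons, hx, ih]

theorem flatMap_singleton_map {α β : Type} (l : List α) (f : α → β) :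
    l.flatMap (fun x => [f x]) = l.map f := by
  induction l with
  | nil => rfl
  | cons x l ih => simp [ih]

theorem stepB_eq_flatMap (matrix : List (List Int)) (h : Bool) (F : List (Int × Int × List (Int × Int))) :
    stepB matrix h F = F.flatMap (childB matrix h) := by
  unfold stepB
  cases h with
  | false =>
      have key : ∀ (acc : List (Int × Int × List (Int × Int))) (e : Int × Int × List (Int × Int)),
          (PySem.List.pyRange 0 (matrix.length : Int) 1).foldl (fun a ni =>
            if ni ≠ e.1 then a ++ [(ni, e.2.1, e.2.2 ++ [(ni, e.2.1)])] else a) acc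
          = acc ++ childB matrix false e := by
        intro acc e
        rw [foldl_append_if_list]
        simp [childB, flatMap_singleton_map]
      simp only [Bool.false_eq_true, if_false, key]
      rw [PySem.List.foldl_append_eq_flatMap]
      simp
  | true =>
      have key : ∀ (acc : List (Int × Int × List (Int × Int))) (e : Int × Int × List (Int × Int)),
          (PySem.List.pyRange 0 ((matrix.headD []).length : Int) 1).foldl (fun a nj =>
            if nj ≠ e.2.1 then a ++ [(e.1, nj, e.2.2 ++ [(e.1, nj)])] else a) acc
          = acc ++ childB matrix true e := by
        intro acc e
        rw [foldl_append_if_list]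
        simp [childB, flatMap_singleton_map]
      simp only [if_true, key]
      rw [PySem.List.foldl_append_eq_flatMap]
      simp

theorem iterB_nil (matrix : List (List Int)) (n : Nat) (h : Bool) :
    iterB matrix n h [] = [] := by
  induction n generalizing h with
  | zero => rfl
  | succ n ih => exact ih (!h)

theorem iterate_step_fst (matrix : List (List Int)) (n : Nat) (h : Bool) (F : List (Int × Int × List (Int × Int))) :
    ((fun st : List (Int × Int × List (Int × Int)) × Bool =>
        if st.1.isEmpty then st else (stepB matrix st.2 st.1, !st.2))^[n] (F, h)).1
      = iterB matrix n h F := by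
  induction n generalizing h F with
  | zero => rfl
  | succ n ih =>
      rw [Function.iterate_succ_apply]
      by_cases hF : F = []
      · subst hF
        simp only [List.isEmpty_nil, if_true]
        rw [ih, iterB_nil, iterB_nil]
      · have : F.isEmpty = false := by simpa [List.isEmpty_iff] using hF
        simp only [this, Bool.false_eq_true, if_false]
        exact ih (!h) (stepB matrix h F)

theorem genA_succ_eq_flatMap (matrix : List (List Int)) (m : Nat) (i j : Int) (h : Bool) :
    genA matrix (m + 2) i j h
      = (if h then
          ((PySem.List.pyRange 0 ((matrix.headD []).length : Int) 1).filter (fun nj => nj ≠ j)).flatMap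
            (fun nj => (genA matrix (m + 1) i nj false).map (fun p => (i, nj) :: p))
        else
          ((PySem.List.pyRange 0 (matrix.length : Int) 1).filter (fun ni => ni ≠ i)).flatMap
            (fun ni => (genA matrix (m + 1) ni j true).map (fun p => (ni, j) :: p))) := by
  cases h with
  | false =>
      show (PySem.List.pyRange 0 (matrix.length : Int) 1).foldl _ [] = _
      rw [foldl_append_if_list]
      simp
  | true =>
      show (PySem.List.pyRange 0 ((matrix.headD []).length : Int) 1).foldl _ [] = _
      rw [foldl_append_if_list]
      simp

theorem iterB_paths (matrix : List (List Int)) :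
    ∀ (m : Nat) (h : Bool) (F : List (Int × Int × List (Int × Int))),
      (iterB matrix (m + 1) h F).map (fun e => e.2.2)
        = F.flatMap (fun e => (genA matrix (m + 1) e.1 e.2.1 h).map (fun p => e.2.2 ++ p)) := by
  intro m
  induction m with
  | zero =>
      intro h F
      show (stepB matrix h F).map (fun e => e.2.2) = _
      rw [stepB_eq_flatMap, List.map_flatMap]
      apply List.flatMap_congr
      intro e _
      cases h <;> simp [childB, genA, List.map_filter, Function.comp]
  | succ m ih =>
      intro h F
      show (iterB matrix (m + 1) (!h) (stepB matrix h F)).map (fun e => e.2.2) = _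
      rw [ih (!h) (stepB matrix h F), stepB_eq_flatMap, List.flatMap_assoc]
      apply List.flatMap_congr
      intro e _
      rw [genA_succ_eq_flatMap]
      cases h <;>
        simp [childB, List.flatMap_map, List.map_flatMap, List.map_map, Function.comp_def,
          List.append_assoc]

-- ===== VERDICT (by name: the statement is the Claim_ definition above) =====
theorem generate_all_paths_spec : Claim_equal_generate_all_paths := by
  intro matrix buffer_size start is_horizontal _ hpre
  obtain ⟨hbs, -⟩ := hpre
  unfold Spec_generate_all_paths generate_all_paths generate_all_paths_alt
  rw [foldl_ignore_eq_iterate, PySem.List.length_pyRange_one, iterate_step_fst]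
  obtain ⟨m, hm⟩ : ∃ m, (buffer_size - 0).toNat = m + 1 := ⟨(buffer_size - 0).toNat - 1, by omega⟩
  have hbn : buffer_size.toNat = m + 1 := by omega
  rw [hm, iterB_paths, hbn]
  simp
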